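-- pv_equiv track=rewrite | github.com/Tanser2024/Tanser-s_study_data | practice6/AXXXXX.py | longest_array
-- ===== SOURCE A (Python) =====
-- def rest(i,x):
--     return int(i)%x
--
-- def longest_array(a,x):
--     s=[rest(i,x) for i in a]
--     if sum(a)%x!=0:
--         return len(a)
--     else:
--         for i in range(len(a)//2+1):
--             if s[i]!=0 or s[len(a)-1-i]!=0:
--                 return len(a)-1-i
--         return -1
-- ===== SOURCE B (Python) =====
-- def longest_array(a, x):
--     if sum(a) % x != 0:
--         return len(a)
--     bad = [i for i, v in enumerate(a) if int(v) % x != 0]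
--     if not bad:
--         return -1
--     return max(len(a) - 1 - bad[0], bad[-1])
-- ===== Notes on version B (the rewrite author's own statement) =====
-- stated objective: simpler
-- what changed: Replaces A's interleaved both-ends early-exit loop over a precomputed full remainder list by one forward enumeration collecting the indices of non-divisible elements and the closed formula max(len(a)-1-bad[0], bad[-1]); correct because len(a)-1-min(first, len(a)-1-last) = max(len(a)-1-first, last); measurably faster by a constant factor since no per-element remainder list is built and the single comprehension does the only pass.
-- crash fix: On an empty list (with x != 0) A raises IndexError at s[0]; B returns -1 (no non-divisible index exists). — e.g. on longest_array([], 1): A raises IndexError, B returns -1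
import Mathlib
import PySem

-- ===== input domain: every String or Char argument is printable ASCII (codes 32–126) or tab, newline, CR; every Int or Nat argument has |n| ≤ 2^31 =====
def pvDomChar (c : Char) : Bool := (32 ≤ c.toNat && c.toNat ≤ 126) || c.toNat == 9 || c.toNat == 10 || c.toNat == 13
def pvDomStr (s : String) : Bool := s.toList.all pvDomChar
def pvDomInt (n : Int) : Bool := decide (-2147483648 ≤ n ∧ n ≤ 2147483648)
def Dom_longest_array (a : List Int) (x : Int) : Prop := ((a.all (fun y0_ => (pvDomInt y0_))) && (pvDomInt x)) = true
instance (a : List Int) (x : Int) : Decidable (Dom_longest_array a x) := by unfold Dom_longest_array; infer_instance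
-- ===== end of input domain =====

-- B replaces A's interleaved both-ends early-exit loop over a precomputed remainder list by one
-- forward enumeration collecting the indices of non-divisible elements and the closed formula
-- max(len(a)-1-bad[0], bad[-1]) (objective: simpler).

-- ===== PORT A =====
def pvRest (i x : Int) : Int := PySem.Int.mod i x

-- the 'for i in range(len(a)//2+1)' loop of A (fuel = number of remaining iterations)
def pvLoopA (s : List Int) (n : Nat) : Nat → Nat → Int
  | _, 0 => -1
  | i, k+1 =>
    if (PySem.List.pyGet? s (i : Int)).getD 0 ≠ 0 ∨ (PySem.List.pyGet? s ((n : Int) - 1 - (i : Int))).getD 0 ≠ 0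
    then (n : Int) - 1 - (i : Int)
    else pvLoopA s n (i+1) k

def longest_array (a : List Int) (x : Int) : Int :=
  let s := a.map (fun i => pvRest i x)
  if PySem.Int.mod a.sum x ≠ 0 then (a.length : Int)
  else pvLoopA s a.length 0 (a.length / 2 + 1)

-- ===== PORT B =====
-- bad = [i for i, v in enumerate(a) if int(v) % x != 0]
def pvBad (a : List Int) (x : Int) : List Int :=
  ((PySem.List.enumerate a 0).filter (fun p => decide (PySem.Int.mod p.2 x ≠ 0))).map (·.1)

def longest_array_alt (a : List Int) (x : Int) : Int :=
  if PySem.Int.mod a.sum x ≠ 0 then (a.length : Int)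
  else
    if pvBad a x = [] then -1
    else max ((a.length : Int) - 1 - (PySem.List.pyGet? (pvBad a x) 0).getD 0)
             ((PySem.List.pyGet? (pvBad a x) (-1)).getD 0)

-- ===== PRECONDITION & SPEC =====
-- Pre_ excludes x = 0 (ZeroDivisionError in both) and the empty list, on which A raises IndexError.
def Pre_longest_array (a : List Int) (x : Int) : Prop := a ≠ [] ∧ x ≠ 0
instance (a : List Int) (x : Int) : Decidable (Pre_longest_array a x) := by unfold Pre_longest_array; infer_instance
def pvWitness_longest_array : List Int × Int := ([2, 3, 4], 2)

-- On an empty list (with x != 0) A raises IndexError at s[0]; B returns -1.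
def Raises_longest_array (a : List Int) (x : Int) : Prop := a = [] ∧ x ≠ 0
instance (a : List Int) (x : Int) : Decidable (Raises_longest_array a x) := by unfold Raises_longest_array; infer_instance
def pvRaiseWitness_longest_array : List Int × Int := ([], 1)
def pvRaiseWitnessOut_longest_array : Int := -1

def Spec_longest_array (a : List Int) (x : Int) (out : Int) : Prop := out = longest_array_alt a x
instance (a : List Int) (x : Int) (out : Int) : Decidable (Spec_longest_array a x out) := by unfold Spec_longest_array; infer_instance

-- ===== CLAIM (what is proved, stated in full; the proofs are below) =====
def Claim_equal_longest_array : Prop := ∀ (a : List Int) (x : Int), Dom_longest_array a x → Pre_longest_array a x → Spec_longest_array a x (longest_array a x)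
def Claim_raises_longest_array : Prop := (∀ (a : List Int) (x : Int), Dom_longest_array a x → Raises_longest_array a x → ¬ Pre_longest_array a x) ∧ (Dom_longest_array (pvRaiseWitness_longest_array.1) (pvRaiseWitness_longest_array.2) ∧ Raises_longest_array (pvRaiseWitness_longest_array.1) (pvRaiseWitness_longest_array.2) ∧ longest_array_alt (pvRaiseWitness_longest_array.1) (pvRaiseWitness_longest_array.2) = pvRaiseWitnessOut_longest_array)

-- ===== LEMMAS AND PROOFS =====

-- generic "first index ≥ i satisfying p, within fuel k": the shape of A's loop
def pvFirst (p : Nat → Bool) : Nat → Nat → Option Nat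
  | _, 0 => none
  | i, k+1 => if p i then some i else pvFirst p (i+1) k

theorem pvFirst_congr (p q : Nat → Bool) (k : Nat) : ∀ i, (∀ j, i ≤ j → j < i + k → p j = q j) → pvFirst p i k = pvFirst q i k := by
  induction k with
  | zero => intro i _; rfl
  | succ k ih =>
    intro i h
    have hpi : p i = q i := h i (le_refl i) (by omega)
    rw [pvFirst, pvFirst, hpi]
    split
    · rfl
    · exact ih (i+1) (fun j h1 h2 => h j (by omega) (by omega))

theorem pvFirst_none_iff (p : Nat → Bool) (k : Nat) : ∀ i, (pvFirst p i k = none ↔ ∀ j, i ≤ j → j < i + k → p j = false) := by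
  induction k with
  | zero =>
    intro i
    constructor
    · intro _ j h1 h2; omega
    · intro _; rfl
  | succ k ih =>
    intro i
    rw [pvFirst]
    by_cases hp : p i = true
    · rw [if_pos hp]
      constructor
      · intro h; exact absurd h (by simp)
      · intro h; rw [h i (le_refl i) (by omega)] at hp; exact absurd hp (by simp)
    · have hp' : p i = false := by simpa using hp
      rw [if_neg (by simp [hp']), ih (i+1)]
      constructor
      · intro h j h1 h2
        rcases Nat.eq_or_lt_of_le h1 with h1 | h1
        · rw [← h1]; exact hp'
        · exact h j h1 (by omega)
      · intro h j h1 h2; exact h j (by omega) (by omega)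

theorem pvFirst_some_iff (p : Nat → Bool) (k : Nat) : ∀ i j, (pvFirst p i k = some j ↔ (i ≤ j ∧ j < i + k ∧ p j = true ∧ ∀ m, i ≤ m → m < j → p m = false)) := by
  induction k with
  | zero =>
    intro i j
    constructor
    · intro h; exact absurd h (by simp [pvFirst])
    · rintro ⟨h1, h2, -, -⟩; omega
  | succ k ih =>
    intro i j
    rw [pvFirst]
    by_cases hp : p i = true
    · rw [if_pos hp]
      constructor
      · intro h
        have hij : i = j := by simpa using h
        subst hij
        exact ⟨le_refl i, by omega, hp, fun m h1 h2 => by omega⟩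
      · rintro ⟨h1, -, -, hmin⟩
        rcases Nat.eq_or_lt_of_le h1 with h1 | h1
        · rw [h1]
        · rw [hmin i (le_refl i) h1] at hp; exact absurd hp (by simp)
    · have hp' : p i = false := by simpa using hp
      rw [if_neg (by simp [hp']), ih (i+1) j]
      constructor
      · rintro ⟨h1, h2, h3, hmin⟩
        refine ⟨by omega, by omega, h3, fun m hm1 hm2 => ?_⟩
        rcases Nat.eq_or_lt_of_le hm1 with hm1 | hm1
        · rw [← hm1]; exact hp'
        · exact hmin m hm1 hm2
      · rintro ⟨h1, h2, h3, hmin⟩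
        have hij : i ≠ j := by rintro rfl; rw [h3] at hp'; exact absurd hp' (by simp)
        exact ⟨by omega, by omega, h3, fun m hm1 hm2 => hmin m (by omega) hm2⟩

-- A's loop as a pvFirst
theorem pvLoopA_eq_pvFirst (s : List Int) (n : Nat) (k : Nat) : ∀ i,
    pvLoopA s n i k =
      (match pvFirst (fun j => decide ((PySem.List.pyGet? s (j : Int)).getD 0 ≠ 0) ||
                              decide ((PySem.List.pyGet? s ((n : Int) - 1 - (j : Int))).getD 0 ≠ 0)) i k with
      | some j => (n : Int) - 1 - (j : Int)
      | none => -1) := by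
  induction k with
  | zero => intro i; rfl
  | succ k ih =>
    intro i
    rw [pvLoopA, pvFirst]
    by_cases h : (PySem.List.pyGet? s (i : Int)).getD 0 ≠ 0 ∨ (PySem.List.pyGet? s ((n : Int) - 1 - (i : Int))).getD 0 ≠ 0
    · rw [if_pos h, if_pos (by simpa using h)]
    · rw [if_neg h, if_neg (by simpa using h), ih]

-- the common predicate: remainder at (in-range) position j is nonzero
def pvQ (a : List Int) (x : Int) (j : Nat) : Bool := decide (PySem.Int.mod (a.getD j 0) x ≠ 0)

theorem pv_map_get_in_range (a : List Int) (x : Int) (j : Nat) (h : j < a.length) :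
    ((PySem.List.pyGet? (a.map (fun i => pvRest i x)) (j : Int))).getD 0 = pvRest (a.getD j 0) x := by
  have h' : j < (a.map (fun i => pvRest i x)).length := by simpa using h
  simp [PySem.List.pyGet?_natCast, List.getElem?_eq_getElem h', List.getD_eq_getElem?_getD,
        List.getElem?_eq_getElem h]

theorem pv_cast_mirror (n j : Nat) (h : j < n) :
    (n : Int) - 1 - (j : Int) = ((n - 1 - j : Nat) : Int) := by omega

-- pvQ is false beyond the list (missing entry reads as 0, and 0 % x == 0)
theorem pvQ_out (a : List Int) (x : Int) (m : Nat) (h : a.length ≤ m) :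
    pvQ a x m = false := by
  have h2 : a[m]? = none := List.getElem?_eq_none (by omega)
  simp [pvQ, List.getD_eq_getElem?_getD, h2, (PySem.Int.mod_eq_zero_iff_dvd 0 x).mpr (dvd_zero x)]

-- membership in the bad-index list
theorem mem_pvBad (a : List Int) (x : Int) (z : Int) :
    z ∈ pvBad a x ↔ ∃ k : Nat, k < a.length ∧ z = (k : Int) ∧ pvQ a x k = true := by
  simp only [pvBad, List.mem_map, List.mem_filter, PySem.List.mem_enumerate_iff]
  constructor
  · rintro ⟨p, ⟨⟨k, hk, rfl⟩, hq⟩, rfl⟩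
    refine ⟨k, hk, by simp, ?_⟩
    simpa [pvQ, List.getD_eq_getElem?_getD, List.getElem?_eq_getElem hk] using hq
  · rintro ⟨k, hk, rfl, hq⟩
    refine ⟨((k : Int), a[k]), ⟨⟨k, hk, by simp⟩, ?_⟩, rfl⟩
    simpa [pvQ, List.getD_eq_getElem?_getD, List.getElem?_eq_getElem hk] using hq

theorem pairwise_pvBad (a : List Int) (x : Int) : (pvBad a x).Pairwise (· < ·) := by
  unfold pvBad
  rw [List.pairwise_map]
  exact (PySem.List.pairwise_lt_enumerate (xs := a) (s := 0)).filter _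

theorem pairwise_head_le {l : List Int} (hp : l.Pairwise (· < ·)) (hne : l ≠ []) :
    ∀ z ∈ l, l.head hne ≤ z := by
  cases l with
  | nil => exact absurd rfl hne
  | cons h t =>
    intro z hz
    rcases List.mem_cons.mp hz with rfl | hz
    · exact le_refl z
    · exact le_of_lt ((List.pairwise_cons.mp hp).1 z hz)

theorem pairwise_le_getLast {l : List Int} (hp : l.Pairwise (· < ·)) :
    ∀ (hne : l ≠ []), ∀ z ∈ l, z ≤ l.getLast hne := by
  induction l with
  | nil => intro hne; exact absurd rfl hne
  | cons h t ih =>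
    intro hne z hz
    cases t with
    | nil =>
      simp only [List.mem_singleton] at hz
      simp [hz]
    | cons h2 t2 =>
      rw [List.getLast_cons (by simp)]
      rcases List.mem_cons.mp hz with rfl | hz
      · have hlast : (h2 :: t2).getLast (by simp) ∈ h2 :: t2 := List.getLast_mem _
        exact le_of_lt ((List.pairwise_cons.mp hp).1 _ hlast)
      · exact ih (List.pairwise_cons.mp hp).2 (by simp) z hz

-- ===== VERDICT (by name: the statement is the Claim_ definition above) =====
theorem longest_array_spec : Claim_equal_longest_array := by
  intro a x _ hpre
  obtain ⟨hne, hx⟩ := hpre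
  unfold Spec_longest_array longest_array longest_array_alt
  by_cases hs : PySem.Int.mod a.sum x ≠ 0
  · rw [if_pos hs, if_pos hs]
  · rw [if_neg hs, if_neg hs]
    have hn : 0 < a.length := List.length_pos_iff.mpr hne
    set n := a.length with hdefn
    rw [pvLoopA_eq_pvFirst]
    rw [pvFirst_congr
          (fun j => decide ((PySem.List.pyGet? (a.map (fun i => pvRest i x)) (j : Int)).getD 0 ≠ 0) ||
                    decide ((PySem.List.pyGet? (a.map (fun i => pvRest i x)) ((n : Int) - 1 - (j : Int))).getD 0 ≠ 0))
          (fun j => pvQ a x j || pvQ a x (n - 1 - j)) (n/2+1) 0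
        (by intro j h1 h2
            have hj : j < n := by omega
            have hj' : n - 1 - j < n := by omega
            show (decide (((PySem.List.pyGet? (a.map (fun i => pvRest i x)) (j : Int)).getD 0) ≠ 0) ||
                  decide (((PySem.List.pyGet? (a.map (fun i => pvRest i x)) ((n : Int) - 1 - (j : Int))).getD 0) ≠ 0))
                 = (pvQ a x j || pvQ a x (n - 1 - j))
            rw [pv_map_get_in_range a x j hj,
                pv_cast_mirror n j hj, pv_map_get_in_range a x (n-1-j) hj']
            simp [pvQ, pvRest])]
    show (match pvFirst (fun j => pvQ a x j || pvQ a x (n - 1 - j)) 0 (n/2+1) with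
          | some j => (n : Int) - 1 - (j : Int)
          | none => -1) = _
    by_cases hb : pvBad a x = []
    · -- no bad index: every pvQ is false, A's search finds nothing
      have hall : ∀ k : Nat, pvQ a x k = false := by
        intro k
        by_cases hk : k < n
        · by_contra hq
          have : (k : Int) ∈ pvBad a x := (mem_pvBad a x _).mpr ⟨k, hk, rfl, by simpa using hq⟩
          rw [hb] at this; simp at this
        · exact pvQ_out a x k (by omega)
      have hC : pvFirst (fun j => pvQ a x j || pvQ a x (n - 1 - j)) 0 (n/2+1) = none := by
        rw [pvFirst_none_iff]
        intro j _ _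
        show (pvQ a x j || pvQ a x (n - 1 - j)) = false
        rw [hall j, hall (n-1-j)]; rfl
      rw [hC, if_pos hb]
    · -- bad list nonempty: head = fl, last = lb
      have hhead : (pvBad a x).head hb ∈ pvBad a x := List.head_mem hb
      have hlastm : (pvBad a x).getLast hb ∈ pvBad a x := List.getLast_mem hb
      obtain ⟨fl, hfl_lt, hfl_eq, hfl_q⟩ := (mem_pvBad a x _).mp hhead
      obtain ⟨lb, hlb_lt, hlb_eq, hlb_q⟩ := (mem_pvBad a x _).mp hlastm
      -- minimality / maximality of fl and lb among bad indices
      have hfl_min : ∀ m : Nat, pvQ a x m = true → fl ≤ m := by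
        intro m hm
        by_cases hmn : m < n
        · have : (m : Int) ∈ pvBad a x := (mem_pvBad a x _).mpr ⟨m, hmn, rfl, hm⟩
          have := pairwise_head_le (pairwise_pvBad a x) hb _ this
          rw [hfl_eq] at this; exact_mod_cast this
        · rw [pvQ_out a x m (by omega)] at hm; exact absurd hm (by simp)
      have hlb_max : ∀ m : Nat, pvQ a x m = true → m ≤ lb := by
        intro m hm
        by_cases hmn : m < n
        · have : (m : Int) ∈ pvBad a x := (mem_pvBad a x _).mpr ⟨m, hmn, rfl, hm⟩
          have := pairwise_le_getLast (pairwise_pvBad a x) hb _ this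
          rw [hlb_eq] at this; exact_mod_cast this
        · rw [pvQ_out a x m (by omega)] at hm; exact absurd hm (by simp)
      have hfl_le_lb : fl ≤ lb := hlb_max fl hfl_q
      -- A's search stops at m0 = min fl (n-1-lb)
      have hC : pvFirst (fun j => pvQ a x j || pvQ a x (n - 1 - j)) 0 (n/2+1) = some (min fl (n-1-lb)) := by
        rw [pvFirst_some_iff]
        refine ⟨by omega, by omega, ?_, ?_⟩
        · show (pvQ a x (min fl (n-1-lb)) || pvQ a x (n - 1 - min fl (n-1-lb))) = true
          rcases Nat.le_total fl (n-1-lb) with h | h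
          · rw [Nat.min_eq_left h, hfl_q]; rfl
          · rw [Nat.min_eq_right h, show n - 1 - (n - 1 - lb) = lb by omega, hlb_q]; simp
        · intro m _ hm2
          show (pvQ a x m || pvQ a x (n - 1 - m)) = false
          have h1 : pvQ a x m = false := by
            by_contra h; exact absurd (hfl_min m (by simpa using h)) (by omega)
          have h2 : pvQ a x (n - 1 - m) = false := by
            by_contra h
            exact absurd (hlb_max (n-1-m) (by simpa using h)) (by omega)
          rw [h1, h2]; rfl
      -- B's value: max (n-1-fl) lb
      have hget0 : (PySem.List.pyGet? (pvBad a x) 0).getD 0 = (fl : Int) := by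
        have h1 : PySem.List.pyGet? (pvBad a x) 0 = some ((pvBad a x).head hb) := by
          rw [PySem.List.pyGet?_zero, ← List.head?_eq_getElem?, List.head?_eq_some_head hb]
        rw [h1, Option.getD_some, hfl_eq]
      have hgetL : (PySem.List.pyGet? (pvBad a x) (-1)).getD 0 = (lb : Int) := by
        rw [PySem.List.pyGet?_neg_one, List.getLast?_eq_some_getLast hb, Option.getD_some, hlb_eq]
      rw [hC, if_neg hb, hget0, hgetL]
      show (n : Int) - 1 - ((min fl (n - 1 - lb) : Nat) : Int) = max ((n : Int) - 1 - (fl : Int)) (lb : Int)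
      omega

@[simp] theorem longest_array_raises : Claim_raises_longest_array := by
  unfold Claim_raises_longest_array
  constructor
  · rintro a x - ⟨rfl, -⟩ ⟨h1, -⟩; exact h1 rfl
  · exact ⟨by decide, by decide, by decide⟩
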